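-- pv_equiv track=rewrite | github.com/yingshaoxo/auto_everything | auto_everything/ml.py | get_global_string_dict_by_using_yingshaoxo_method
-- ===== SOURCE A (Python) =====
-- def get_global_string_dict_by_using_yingshaoxo_method(source_text_data: str, levels: int = 10):
--     global_string_dict = {
--     }
--
--     def get_x_level_dict(source_text: str, x: int):
--         level_dict = {}
--         for index, _ in enumerate(source_text):
--             if index < (x-1):
--                 continue
--             if index == len(source_text) - x:
--                 break
--             current_chars = source_text[index-(x-1): index+1]
--             next_char = source_text[index+1]
--             if current_chars in level_dict:
--                 if next_char in level_dict[current_chars]: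
--                     level_dict[current_chars][next_char] += 1
--                 else:
--                     level_dict[current_chars][next_char] = 1
--             else:
--                 level_dict[current_chars] = {next_char: 1}
--
--         pure_level_dict = {}
--         for key, value in level_dict.items():
--             biggest_value = 0
--             biggest_key = None
--             for key2, value2 in value.items():
--                 if value2 > biggest_value:
--                     biggest_value = value2
--                     biggest_key = key2
--             pure_level_dict[key] = biggest_key
--
--         return pure_level_dict
--
--     max_level = levels
--     for level in reversed(list(range(1, 1+max_level))):
--         global_string_dict[level] = get_x_level_dict(source_text_data, level)
--
--     return global_string_dict
-- ===== SOURCE B (Python) =====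
-- def get_global_string_dict_by_using_yingshaoxo_method(source_text_data: str, levels: int = 10):
--     n = len(source_text_data)
--     counts = {x: {} for x in range(1, levels + 1)}
--     for i in range(n - 1):
--         next_char = source_text_data[i + 1]
--         top = min(i + 1, n - 1 - i, levels)
--         for x in range(1, top + 1):
--             inner = counts[x].setdefault(source_text_data[i - x + 1:i + 1], {})
--             inner[next_char] = inner.get(next_char, 0) + 1
--     return {x: {key: max(c, key=c.get) for key, c in counts[x].items()}
--             for x in range(levels, 0, -1)}
-- ===== Notes on version B (the rewrite author's own statement) =====
-- stated objective: alternative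
-- what changed: A rescans the whole text once per level with a continue/break loop; B makes a single pass over the text with index i, updating the counters of every applicable window length 1..min(i+1, len-1-i, levels) at once, then reduces each level's counters with max(c, key=c.get).
import Mathlib
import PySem

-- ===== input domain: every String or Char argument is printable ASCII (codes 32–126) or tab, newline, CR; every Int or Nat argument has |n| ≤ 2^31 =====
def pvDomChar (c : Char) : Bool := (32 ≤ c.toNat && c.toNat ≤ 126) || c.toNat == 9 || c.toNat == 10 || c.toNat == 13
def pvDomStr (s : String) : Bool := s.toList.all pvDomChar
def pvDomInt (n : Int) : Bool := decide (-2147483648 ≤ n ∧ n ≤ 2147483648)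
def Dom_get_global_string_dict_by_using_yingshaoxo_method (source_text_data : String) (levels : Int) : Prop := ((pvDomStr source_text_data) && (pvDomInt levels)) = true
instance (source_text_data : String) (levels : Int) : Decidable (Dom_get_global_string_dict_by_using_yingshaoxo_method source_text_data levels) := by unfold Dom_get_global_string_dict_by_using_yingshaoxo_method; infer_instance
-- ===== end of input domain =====

-- B replaces A's per-level rescans of the text by ONE pass over the text updating all level
-- counters at once (objective: alternative decomposition; same asymptotic cost).

-- ===== PORT A =====
-- the if/else chain updating level_dict[current_chars][next_char]
def pvA_upd (d : PySem.Dict String (PySem.Dict String Int)) (cur nc : String) :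
    PySem.Dict String (PySem.Dict String Int) :=
  if d.contains cur then
    let inner := d.getD cur PySem.Dict.empty
    if inner.contains nc then d.insert cur (inner.insert nc (inner.getD nc 0 + 1))
    else d.insert cur (inner.insert nc 1)
  else d.insert cur (PySem.Dict.empty.insert nc 1)

-- the 'for index, _ in enumerate(source_text)' loop with continue/break
def pvA_countLoop (s : List Char) (x : Int) :
    List (Int × Char) → PySem.Dict String (PySem.Dict String Int) → PySem.Dict String (PySem.Dict String Int)
  | [], d => d
  | (idx, _) :: rest, d =>
    if idx < x - 1 then pvA_countLoop s x rest d
    else if idx = (s.length : Int) - x then d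
    else
      match PySem.List.pyGet? s (idx + 1) with
      | none => d   -- source_text[index+1] raises IndexError in Python here: excluded by Pre_
      | some nc =>
        pvA_countLoop s x rest
          (pvA_upd d (String.ofList (PySem.List.slice s (some (idx - (x - 1))) (some (idx + 1)))) (String.ofList [nc]))

-- the biggest_value/biggest_key scan over value.items()
def pvA_best (c : PySem.Dict String Int) : String :=
  (c.items.foldl (fun (p : Int × Option String) kv => if kv.2 > p.1 then (kv.2, some kv.1) else p)
    ((0 : Int), (none : Option String))).2.getD ""
  -- biggest_key is None only for an empty inner dict, which the loop never produces

-- the pure_level_dict loop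
def pvA_pure (lvl : PySem.Dict String (PySem.Dict String Int)) : PySem.Dict String String :=
  lvl.items.foldl (fun pd kv => pd.insert kv.1 (pvA_best kv.2)) PySem.Dict.empty

def pvA_get_x_level_dict (s : List Char) (x : Int) : PySem.Dict String String :=
  pvA_pure (pvA_countLoop s x (PySem.List.enumerate s 0) PySem.Dict.empty)

def get_global_string_dict_by_using_yingshaoxo_method (source_text_data : String) (levels : Int) :
    List (Int × List (String × String)) :=
  let s := source_text_data.toList
  ((PySem.List.pyRange 1 (1 + levels) 1).reverse.foldl
      (fun (g : PySem.Dict Int (PySem.Dict String String)) level =>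
        g.insert level (pvA_get_x_level_dict s level))
      PySem.Dict.empty).items.map (fun p => (p.1, p.2.items))

-- ===== PORT B =====
-- inner = counts[x].setdefault(key, {}); inner[next_char] = inner.get(next_char, 0) + 1
def pvB_bump (lvl : PySem.Dict String (PySem.Dict String Int)) (key nc : String) :
    PySem.Dict String (PySem.Dict String Int) :=
  let inner := lvl.getD key PySem.Dict.empty
  lvl.insert key (inner.insert nc (inner.getD nc 0 + 1))

-- counts = {x: {} for x in range(1, levels+1)} followed by the single pass over i
def pvB_pass (s : List Char) (levels : Int) :
    PySem.Dict Int (PySem.Dict String (PySem.Dict String Int)) :=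
  let n : Int := s.length
  let init := (PySem.List.pyRange 1 (levels + 1) 1).foldl
      (fun c x => c.insert x PySem.Dict.empty) PySem.Dict.empty
  (PySem.List.pyRange 0 (n - 1) 1).foldl
    (fun c i =>
      let nc := String.ofList [PySem.List.pyGetD s (i + 1) ' ']   -- i+1 ≤ n-1 is always in range
      let top := min (min (i + 1) (n - 1 - i)) levels
      (PySem.List.pyRange 1 (top + 1) 1).foldl
        (fun c x =>
          c.modify x PySem.Dict.empty   -- counts[x]: key x is always present (1 ≤ x ≤ levels)
            (fun lvl => pvB_bump lvl (String.ofList (PySem.List.slice s (some (i - x + 1)) (some (i + 1)))) nc))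
        c)
    init

-- max(c, key=c.get)
def pvB_choose (c : PySem.Dict String Int) : String :=
  (PySem.List.max? c.keys (fun k => c.getD k 0)).getD ""   -- c is never empty where this is used

def get_global_string_dict_by_using_yingshaoxo_method_alt (source_text_data : String) (levels : Int) :
    List (Int × List (String × String)) :=
  let s := source_text_data.toList
  let counts := pvB_pass s levels
  ((PySem.List.pyRange levels 0 (-1)).foldl
      (fun (g : PySem.Dict Int (PySem.Dict String String)) x =>
        g.insert x (PySem.Dict.ofList
          ((counts.getD x PySem.Dict.empty).items.map (fun kv => (kv.1, pvB_choose kv.2)))))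
      PySem.Dict.empty).items.map (fun p => (p.1, p.2.items))

-- ===== PRECONDITION & SPEC =====
-- Pre_ excludes exactly the inputs where A raises IndexError: when some level x ≤ levels with
-- x ≤ len skips its break index (len-x < x-1) and reads source_text[len].  Equivalently
-- 2*min(levels, len) > len+1.
def Pre_get_global_string_dict_by_using_yingshaoxo_method (source_text_data : String) (levels : Int) : Prop :=
  2 * min levels (source_text_data.toList.length : Int) ≤ (source_text_data.toList.length : Int) + 1
instance (source_text_data : String) (levels : Int) : Decidable (Pre_get_global_string_dict_by_using_yingshaoxo_method source_text_data levels) := by unfold Pre_get_global_string_dict_by_using_yingshaoxo_method; infer_instance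

def pvWitness_get_global_string_dict_by_using_yingshaoxo_method : String × Int := ("abab", 2)

def Spec_get_global_string_dict_by_using_yingshaoxo_method (source_text_data : String) (levels : Int) (out : List (Int × List (String × String))) : Prop := out = get_global_string_dict_by_using_yingshaoxo_method_alt source_text_data levels
instance (source_text_data : String) (levels : Int) (out : List (Int × List (String × String))) : Decidable (Spec_get_global_string_dict_by_using_yingshaoxo_method source_text_data levels out) := by unfold Spec_get_global_string_dict_by_using_yingshaoxo_method; infer_instance

-- ===== CLAIM (what is proved, stated in full; the proofs are below) =====
def Claim_equal_get_global_string_dict_by_using_yingshaoxo_method : Prop := ∀ (source_text_data : String) (levels : Int), Dom_get_global_string_dict_by_using_yingshaoxo_method source_text_data levels → Pre_get_global_string_dict_by_using_yingshaoxo_method source_text_data levels → Spec_get_global_string_dict_by_using_yingshaoxo_method source_text_data levels (get_global_string_dict_by_using_yingshaoxo_method source_text_data levels)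


-- ===== LEMMAS AND PROOFS =====

-- The common per-level fold both ports' level dictionaries are reduced to:
-- indices i = x-1 .. len-x-1, counting next-char occurrences per window.
def pvStep (s : List Char) (x : Int)
    (d : PySem.Dict String (PySem.Dict String Int)) (i : Int) :
    PySem.Dict String (PySem.Dict String Int) :=
  pvB_bump d (String.ofList (PySem.List.slice s (some (i - (x - 1))) (some (i + 1))))
    (String.ofList [PySem.List.pyGetD s (i + 1) ' '])

def pvLevelFold (s : List Char) (x : Int) : PySem.Dict String (PySem.Dict String Int) :=
  (PySem.List.pyRange (x - 1) ((s.length : Int) - x) 1).foldl (pvStep s x) PySem.Dict.empty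

-- invariant of the count dicts: unique keys, nonempty inner dicts, counts ≥ 1
def pvGood (d : PySem.Dict String (PySem.Dict String Int)) : Prop :=
  d.keys.Nodup ∧ ∀ kv ∈ d.items, kv.2.keys.Nodup ∧ kv.2.items ≠ [] ∧ ∀ nv ∈ kv.2.items, 1 ≤ nv.2

lemma pvA_upd_eq (d : PySem.Dict String (PySem.Dict String Int)) (cur nc : String) :
    pvA_upd d cur nc = pvB_bump d cur nc := by
  unfold pvA_upd pvB_bump
  by_cases h : d.contains cur = true
  · simp only [h, if_true]
    by_cases h2 : (d.getD cur PySem.Dict.empty).contains nc = true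
    · simp [h2]
    · simp [h2, PySem.Dict.getD_of_not_contains _ _ (by simpa using h2)]
  · simp [h, PySem.Dict.getD_of_not_contains _ (PySem.Dict.empty) (by simpa using h),
      PySem.Dict.getD_empty]

lemma pvA_go (s : List Char) (x : Int) (hx : 1 ≤ x) :
    ∀ (n j : Nat) (d), n = s.length - j → j ≤ s.length →
    ((x - 1 ≤ (s.length : Int) - x ∧ (j : Int) ≤ (s.length : Int) - x) ∨ (s.length : Int) < x) →
    pvA_countLoop s x (PySem.List.enumerate (s.drop j) j) d
      = (PySem.List.pyRange (max (x - 1) (j : Int)) ((s.length : Int) - x) 1).foldl (pvStep s x) d := by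
  intro n
  induction n with
  | zero =>
    intro j d hn hj hcond
    have hjlen : j = s.length := by omega
    have hd : s.drop j = [] := by simp [hjlen]
    rw [hd, PySem.List.pyRange_one_eq_nil (by omega)]
    simp [PySem.List.enumerate, pvA_countLoop]
  | succ n ih =>
    intro j d hn hj hcond
    have hjlt : j < s.length := by omega
    rw [List.drop_eq_getElem_cons hjlt]
    simp only [PySem.List.enumerate]
    by_cases h1 : (j : Int) < x - 1
    · rw [pvA_countLoop]
      simp only [h1, if_true]
      have hrec := ih (j+1) d (by omega) (by omega)
        (by
          rcases hcond with ⟨ha, hb⟩ | h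
          · left; refine ⟨ha, by push_cast; omega⟩
          · right; exact h)
      rw [show ((j:Int) + 1) = ((j+1 : Nat) : Int) by push_cast; ring]
      rw [hrec]
      congr 2
      omega
    · by_cases h2 : (j : Int) = (s.length : Int) - x
      · rw [pvA_countLoop]
        rw [if_neg h1, if_pos h2]
        rw [PySem.List.pyRange_one_eq_nil (by omega)]
        simp
      · have hxle : x - 1 ≤ (s.length : Int) - x ∧ (j : Int) ≤ (s.length : Int) - x := by
          rcases hcond with h | h
          · exact h
          · exfalso; omega
        have hjlt2 : (j : Int) < (s.length : Int) - x := by omega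
        have hnext : j + 1 < s.length := by omega
        have hget : PySem.List.pyGet? s ((j : Int) + 1) = some s[j+1] := by
          have h := PySem.List.pyGet?_natCast s (j+1)
          push_cast at h
          rw [h, List.getElem?_eq_getElem hnext]
        have hgetD : PySem.List.pyGetD s ((j : Int) + 1) ' ' = s[j+1] := by
          unfold PySem.List.pyGetD
          rw [hget]
          rfl
        rw [pvA_countLoop]
        rw [if_neg h1, if_neg h2, hget]
        rw [show max (x - 1) ((j:Int)) = (j:Int) by omega]
        rw [PySem.List.pyRange_one_cons hjlt2, List.foldl_cons]
        have hrec := ih (j+1) (pvA_upd d (String.ofList (PySem.List.slice s (some ((j:Int) - (x - 1))) (some ((j:Int) + 1)))) (String.ofList [s[j+1]]))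
          (by omega) (by omega)
          (by left; exact ⟨hxle.1, by push_cast; omega⟩)
        rw [show max (x - 1) (((j+1:Nat)) : Int) = ((j+1:Nat) : Int) by push_cast; omega] at hrec
        push_cast at hrec ⊢
        rw [hrec]
        congr 1
        rw [pvA_upd_eq]
        unfold pvStep
        rw [hgetD]

lemma pvA_countLoop_eq (s : List Char) (x : Int) (hx : 1 ≤ x)
    (hOK : x - 1 ≤ (s.length : Int) - x ∨ (s.length : Int) < x) :
    pvA_countLoop s x (PySem.List.enumerate s 0) PySem.Dict.empty = pvLevelFold s x := by
  have := pvA_go s x hx s.length 0 PySem.Dict.empty (by omega) (by omega)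
    (hOK.elim (fun h => Or.inl ⟨h, by omega⟩) Or.inr)
  simpa [pvLevelFold, show max (x-1) (0:Int) = x - 1 by omega] using this

lemma pvProj_modify_fold {ν : Type} (g : Int → ν → ν) (d0 : ν) (k : Int) :
    ∀ (l : List Int), l.Nodup → ∀ (c : PySem.Dict Int ν),
    (l.foldl (fun c x => c.modify x d0 (g x)) c).getD k d0
      = if k ∈ l then g k (c.getD k d0) else c.getD k d0 := by
  intro l
  induction l with
  | nil => intro _ c; simp
  | cons a l ih =>
    intro hnd c
    rw [List.foldl_cons, ih (by simp_all [List.nodup_cons])]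
    by_cases hk : k = a
    · subst hk
      have : k ∉ l := by simp_all [List.nodup_cons]
      simp [this, PySem.Dict.getD_modify]
    · rw [PySem.Dict.getD_modify]
      simp [hk, List.mem_cons]

lemma pvFilter_pyRange (l u : Int) :
    ∀ (n : Nat) (a b : Int), n = (b - a).toNat →
    (PySem.List.pyRange a b 1).filter (fun i => decide (l ≤ i ∧ i ≤ u))
      = PySem.List.pyRange (max a l) (min b (u + 1)) 1 := by
  intro n
  induction n with
  | zero =>
    intro a b hn
    rw [PySem.List.pyRange_one_eq_nil (by omega), PySem.List.pyRange_one_eq_nil (by omega)]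
    simp
  | succ n ih =>
    intro a b hn
    have hab : a < b := by omega
    rw [PySem.List.pyRange_one_cons hab, List.filter_cons]
    by_cases hc : l ≤ a ∧ a ≤ u
    · have h1 : max a l = a := by omega
      have h2 : a < min b (u + 1) := by omega
      rw [h1, PySem.List.pyRange_one_cons h2]
      simp only [hc, decide_eq_true_eq, and_self, if_true, decide_true]
      rw [ih (a+1) b (by omega)]
      rw [show max (a+1) l = a + 1 by omega]
    · simp only [decide_eq_true_eq, hc, if_false]
      rw [ih (a+1) b (by omega)]
      by_cases hal : a < l
      · rw [show max (a+1) l = l by omega, show max a l = l by omega]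
      · have hau : u < a := by omega
        rw [PySem.List.pyRange_one_eq_nil (by omega), PySem.List.pyRange_one_eq_nil (by omega)]

lemma pvGetD_const_insert_fold {ν : Type} (d0 : ν) (k : Int) :
    ∀ (l : List Int) (c : PySem.Dict Int ν), c.getD k d0 = d0 →
    (l.foldl (fun c x => c.insert x d0) c).getD k d0 = d0 := by
  intro l
  induction l with
  | nil => intro c h; simpa using h
  | cons a l ih =>
    intro c h
    rw [List.foldl_cons]
    apply ih
    rw [PySem.Dict.getD_insert]
    split_ifs <;> simp [h]

lemma pvB_pass_go (s : List Char) (levels x : Int) (hx1 : 1 ≤ x) (hxl : x ≤ levels) :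
    ∀ (I : List Int) (c : PySem.Dict Int (PySem.Dict String (PySem.Dict String Int))),
    (I.foldl
      (fun c i =>
        let nc := String.ofList [PySem.List.pyGetD s (i + 1) ' ']
        let top := min (min (i + 1) ((s.length : Int) - 1 - i)) levels
        (PySem.List.pyRange 1 (top + 1) 1).foldl
          (fun c x =>
            c.modify x PySem.Dict.empty
              (fun lvl => pvB_bump lvl (String.ofList (PySem.List.slice s (some (i - x + 1)) (some (i + 1)))) nc))
          c)
      c).getD x PySem.Dict.empty
    = (I.filter (fun i => decide (x - 1 ≤ i ∧ i ≤ (s.length : Int) - 1 - x))).foldl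
        (pvStep s x) (c.getD x PySem.Dict.empty) := by
  intro I
  induction I with
  | nil => intro c; simp
  | cons i I ih =>
    intro c
    rw [List.foldl_cons, ih, List.filter_cons]
    simp only []
    rw [pvProj_modify_fold _ _ _ _ (PySem.List.nodup_pyRange_one _ _) c]
    by_cases hc : x - 1 ≤ i ∧ i ≤ (s.length : Int) - 1 - x
    · have hmem : x ∈ PySem.List.pyRange 1 (min (min (i + 1) ((s.length : Int) - 1 - i)) levels + 1) 1 := by
        rw [PySem.List.mem_pyRange_one]; omega
      simp only [hmem, if_true, hc, decide_eq_true_eq, and_self, decide_true]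
      rw [List.foldl_cons]
      congr 2
      rw [show i - x + 1 = i - (x - 1) by ring]
    · have hmem : x ∉ PySem.List.pyRange 1 (min (min (i + 1) ((s.length : Int) - 1 - i)) levels + 1) 1 := by
        rw [PySem.List.mem_pyRange_one]; omega
      simp only [hmem, if_false, hc, decide_eq_true_eq, decide_false]
      simp

lemma pvB_proj (s : List Char) (levels x : Int) (hx1 : 1 ≤ x) (hxl : x ≤ levels) :
    (pvB_pass s levels).getD x PySem.Dict.empty = pvLevelFold s x := by
  unfold pvB_pass
  rw [pvB_pass_go s levels x hx1 hxl]
  rw [pvGetD_const_insert_fold _ _ _ _ (by simp)]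
  rw [pvFilter_pyRange _ _ ((s.length : Int) - 1 - 0).toNat 0 ((s.length : Int) - 1) rfl]
  rw [show max 0 (x - 1) = x - 1 by omega,
    show min ((s.length : Int) - 1) ((s.length : Int) - 1 - x + 1) = (s.length : Int) - x by omega]
  rfl

lemma pvMem_items_getD {κ ν : Type} [BEq κ] [LawfulBEq κ] (d : PySem.Dict κ ν) (k : κ) (d0 : ν)
    (hnd : d.keys.Nodup) (h : d.contains k = true) : (k, d.getD k d0) ∈ d.items := by
  rw [PySem.Dict.items_eq_map_keys d hnd d0]
  exact List.mem_map.mpr ⟨k, (PySem.Dict.contains_iff_mem_keys d k).mp h, rfl⟩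

lemma pvGood_bump (d : PySem.Dict String (PySem.Dict String Int)) (key nc : String)
    (h : pvGood d) : pvGood (pvB_bump d key nc) := by
  obtain ⟨hnd, hitems⟩ := h
  unfold pvB_bump
  set inner := d.getD key PySem.Dict.empty with hinner
  have hinner_props : inner.keys.Nodup ∧ ∀ nv ∈ inner.items, 1 ≤ nv.2 := by
    by_cases hc : d.contains key = true
    · have := hitems _ (pvMem_items_getD d key PySem.Dict.empty hnd hc)
      exact ⟨this.1, this.2.2⟩
    · rw [hinner, PySem.Dict.getD_of_not_contains _ _ (by simpa using hc)]
      constructor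
      · simpa using PySem.Dict.nodup_keys_empty (κ := String) (ν := Int)
      · intro nv hnv; simp [PySem.Dict.empty] at hnv
  have hval : (0:Int) ≤ inner.getD nc 0 := by
    by_cases hc2 : inner.contains nc = true
    · have := hinner_props.2 _ (pvMem_items_getD inner nc 0 hinner_props.1 hc2)
      omega
    · rw [PySem.Dict.getD_of_not_contains _ _ (by simpa using hc2)]
  constructor
  · exact PySem.Dict.nodup_keys_insert _ _ _ hnd
  · intro kv hkv
    rw [PySem.Dict.mem_items_insert] at hkv
    rcases hkv with h1 | ⟨h2, _⟩
    · subst h1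
      refine ⟨PySem.Dict.nodup_keys_insert _ _ _ hinner_props.1, ?_, ?_⟩
      · exact List.ne_nil_of_mem (PySem.Dict.mem_items_insert_self _ _ _)
      · intro nv hnv
        rw [PySem.Dict.mem_items_insert] at hnv
        rcases hnv with h1 | ⟨h2, _⟩
        · subst h1; simp only []; omega
        · exact (hinner_props.2 _ h2)
    · exact hitems _ h2

lemma pvGood_levelFold (s : List Char) (x : Int) : pvGood (pvLevelFold s x) := by
  unfold pvLevelFold
  have : ∀ (l : List Int) (d), pvGood d → pvGood (l.foldl (pvStep s x) d) := by
    intro l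
    induction l with
    | nil => intro d h; simpa using h
    | cons a l ih => intro d h; exact ih _ (pvGood_bump _ _ _ h)
  apply this
  refine ⟨by simpa using PySem.Dict.nodup_keys_empty (κ := String) (ν := PySem.Dict String Int), ?_⟩
  intro kv hkv; simp [PySem.Dict.empty] at hkv

lemma pvArgmax_aux (f : String → Int) :
    ∀ (ks : List String) (b : String),
    ((ks.map (fun k => (k, f k))).foldl
      (fun (p : Int × Option String) kv => if kv.2 > p.1 then (kv.2, some kv.1) else p) (f b, some b)).2
    = ks.foldl
        (fun acc x => match acc with
          | none => some x
          | some m => if f m < f x then some x else some m) (some b) := by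
  intro ks
  induction ks with
  | nil => intro b; rfl
  | cons k t ih =>
    intro b
    simp only [List.map_cons, List.foldl_cons]
    by_cases h : f b < f k
    · simp only [gt_iff_lt, h, if_true]
      exact ih k
    · simp only [gt_iff_lt, h, if_false]
      exact ih b

lemma pvBest_eq_choose (c : PySem.Dict String Int) (hnd : c.keys.Nodup)
    (hne : c.items ≠ []) (hpos : ∀ nv ∈ c.items, 1 ≤ nv.2) :
    pvA_best c = pvB_choose c := by
  unfold pvA_best pvB_choose PySem.List.max?
  rw [PySem.Dict.items_eq_map_keys c hnd 0]
  have hksne : c.keys ≠ [] := by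
    intro h
    apply hne
    rw [PySem.Dict.items_eq_map_keys c hnd 0, h]
    rfl
  obtain ⟨k, t, hk⟩ := List.exists_cons_of_ne_nil hksne
  rw [hk]
  simp only [List.map_cons, List.foldl_cons]
  have hk1 : (1:Int) ≤ c.getD k 0 := by
    have : (k, c.getD k 0) ∈ c.items := by
      rw [PySem.Dict.items_eq_map_keys c hnd 0, hk]; simp
    exact hpos _ this
  rw [if_pos (by simp only [gt_iff_lt]; omega)]
  rw [pvArgmax_aux (fun k => c.getD k 0) t k]
  congr 1
  apply PySem.List.foldl_congr_mem
  intro acc x _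
  cases acc <;> rfl

lemma pvPure_eq (lvl : PySem.Dict String (PySem.Dict String Int)) (h : pvGood lvl) :
    pvA_pure lvl = PySem.Dict.ofList (lvl.items.map (fun kv => (kv.1, pvB_choose kv.2))) := by
  obtain ⟨hnd, hitems⟩ := h
  have hkeys : (lvl.items.map (fun kv => kv.1)).Nodup := hnd
  apply PySem.Dict.ext
  rw [pvA_pure, PySem.Dict.items_foldl_insert_fresh lvl.items (fun kv => kv.1)
    (fun kv => pvA_best kv.2) PySem.Dict.empty
    (fun a _ => PySem.Dict.contains_empty _) hkeys]
  rw [PySem.Dict.ofList, PySem.Dict.update, PySem.Dict.items_foldl_insert_fresh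
    (lvl.items.map (fun kv => (kv.1, pvB_choose kv.2))) (fun p => p.1) (fun p => p.2)
    PySem.Dict.empty (fun a _ => PySem.Dict.contains_empty _)
    (by simpa [Function.comp, List.map_map] using hkeys)]
  simp only [List.map_map]
  apply congrArg
  apply List.map_congr_left
  intro kv hkv
  have := hitems kv hkv
  simp only [Function.comp]
  rw [pvBest_eq_choose kv.2 this.1 this.2.1 this.2.2]

-- ===== VERDICT (by name: the statement is the Claim_ definition above) =====
theorem get_global_string_dict_by_using_yingshaoxo_method_spec : Claim_equal_get_global_string_dict_by_using_yingshaoxo_method := by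
  unfold Claim_equal_get_global_string_dict_by_using_yingshaoxo_method
    Spec_get_global_string_dict_by_using_yingshaoxo_method
    Pre_get_global_string_dict_by_using_yingshaoxo_method
  intro st lv _ hpre
  unfold get_global_string_dict_by_using_yingshaoxo_method
    get_global_string_dict_by_using_yingshaoxo_method_alt
  simp only []
  rw [PySem.List.pyRange_neg_one_eq_reverse lv 0]
  rw [show ((0:Int) + 1) = 1 by ring, show (1 + lv) = lv + 1 by ring]
  apply congrArg
  apply congrArg
  apply PySem.List.foldl_congr_mem
  intro g x hx
  rw [List.mem_reverse, PySem.List.mem_pyRange_one] at hx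
  have hx1 : 1 ≤ x := hx.1
  have hxl : x ≤ lv := by omega
  apply congrArg
  rw [pvB_proj st.toList lv x hx1 hxl]
  unfold pvA_get_x_level_dict
  rw [pvA_countLoop_eq st.toList x hx1 (by omega)]
  exact pvPure_eq _ (pvGood_levelFold st.toList x)
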